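-- pv_equiv track=rewrite | github.com/Maysk/CAnA | Parte02/lista02.py | question01_b
-- ===== SOURCE A (Python) =====
-- from math import floor, ceil, inf
--
-- def question01_b(value):
-- 	solutions_vector = 	[0 for i in range(value+1)]
-- 	for i in range(5, value+1):
-- 		solutions_vector[i] = 	(
-- 								solutions_vector[floor(i/2)]
-- 								+ solutions_vector[floor(i/2) + 1]
-- 								+ solutions_vector[floor(i/2) + 2]
-- 								+ i
-- 								)
-- 	return solutions_vector[value]
-- ===== SOURCE B (Python) =====
-- def question01_b(value):
--     # f(i) = 0 for i < 5, else f(i//2) + f(i//2+1) + f(i//2+2) + i.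
--     # window(i) returns (f(i), f(i+1), f(i+2), f(i+3), f(i+4)); each window
--     # only needs the window at i//2, so the whole computation is O(log value).
--     def window(i):
--         if i <= 0:
--             return (0, 0, 0, 0, 0)
--         h = i // 2
--         a = window(h)
--         def f(j):
--             return 0 if j < 5 else a[j // 2 - h] + a[j // 2 - h + 1] + a[j // 2 - h + 2] + j
--         return (f(i), f(i + 1), f(i + 2), f(i + 3), f(i + 4))
--     return window(value)[0]
-- ===== Notes on version B (the rewrite author's own statement) =====
-- stated objective: faster
-- what changed: Replaces the O(n) bottom-up DP table of size value+1 by a recursion on halved indices that carries a 5-wide window (f(i)..f(i+4)), since each window is determined by the window at i//2; O(log n) time and space.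
-- crash fix: On value < 0 A raises IndexError (indexing an empty table); B's base case returns 0 there. — e.g. on question01_b(-1): A raises IndexError, B returns 0
import Mathlib
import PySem

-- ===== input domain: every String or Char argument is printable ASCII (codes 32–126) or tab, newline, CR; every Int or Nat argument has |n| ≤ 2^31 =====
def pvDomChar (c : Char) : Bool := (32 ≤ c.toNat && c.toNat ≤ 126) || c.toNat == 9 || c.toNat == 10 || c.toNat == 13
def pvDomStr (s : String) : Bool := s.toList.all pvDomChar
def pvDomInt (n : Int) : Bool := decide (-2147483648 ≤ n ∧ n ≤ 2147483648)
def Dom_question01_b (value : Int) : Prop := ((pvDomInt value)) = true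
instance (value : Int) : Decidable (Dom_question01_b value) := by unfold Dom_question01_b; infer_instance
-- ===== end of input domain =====

-- B replaces A's O(n) bottom-up DP table by an O(log n) recursion on halved
-- indices carrying a 5-wide window of consecutive values (return value only).

-- ===== PORT A =====
-- floor(i/2) on ints of this size is exactly i // 2, ported as PySem.Int.floordiv i 2.
def question01_b (value : Int) : Int :=
  let vec0 : List Int := (PySem.List.pyRange 0 (value + 1) 1).map (fun _ => (0 : Int))
  let vec := (PySem.List.pyRange 5 (value + 1) 1).foldl
    (fun v i =>
      PySem.List.pySetD v i
        (PySem.List.pyGetD v (PySem.Int.floordiv i 2) 0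
          + PySem.List.pyGetD v (PySem.Int.floordiv i 2 + 1) 0
          + PySem.List.pyGetD v (PySem.Int.floordiv i 2 + 2) 0
          + i)) vec0
  PySem.List.pyGetD vec value 0   -- xs[value]; IndexError (value < 0) excluded by Pre_

-- ===== PORT B =====
-- tuple indexing a[k] (k is 0..4 here; Python's j//2 - h is nonnegative whenever used)
def pvTupGet (a : Int × Int × Int × Int × Int) (k : Nat) : Int :=
  match k with
  | 0 => a.1
  | 1 => a.2.1
  | 2 => a.2.2.1
  | 3 => a.2.2.2.1
  | _ => a.2.2.2.2

def pvWindow (i : Int) : Int × Int × Int × Int × Int :=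
  if i ≤ 0 then (0, 0, 0, 0, 0)
  else
    let h := PySem.Int.floordiv i 2
    let a := pvWindow h
    let f : Int → Int := fun j =>
      if j < 5 then 0
      else
        pvTupGet a (PySem.Int.floordiv j 2 - h).toNat
          + pvTupGet a ((PySem.Int.floordiv j 2 - h).toNat + 1)
          + pvTupGet a ((PySem.Int.floordiv j 2 - h).toNat + 2)
          + j
    (f i, f (i + 1), f (i + 2), f (i + 3), f (i + 4))
termination_by i.toNat
decreasing_by
  rw [PySem.Int.floordiv_eq_ediv_of_pos (by omega : (0:Int) < 2)]
  omega

def question01_b_alt (value : Int) : Int := (pvWindow value).1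

-- ===== PRECONDITION & SPEC =====
-- Pre_ excludes value < 0, where A raises IndexError (empty DP table is indexed).
def Pre_question01_b (value : Int) : Prop := 0 ≤ value
instance (value : Int) : Decidable (Pre_question01_b value) := by unfold Pre_question01_b; infer_instance
def pvWitness_question01_b : Int := 7

-- On value < 0 A raises IndexError; B's base case returns 0.
def Raises_question01_b (value : Int) : Prop := value < 0
instance (value : Int) : Decidable (Raises_question01_b value) := by unfold Raises_question01_b; infer_instance
def pvRaiseWitness_question01_b : Int := -1
def pvRaiseWitnessOut_question01_b : Int := 0

def Spec_question01_b (value : Int) (out : Int) : Prop := out = question01_b_alt value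
instance (value : Int) (out : Int) : Decidable (Spec_question01_b value out) := by unfold Spec_question01_b; infer_instance

-- ===== CLAIM (what is proved, stated in full; the proofs are below) =====
def Claim_equal_question01_b : Prop := ∀ (value : Int), Dom_question01_b value → Pre_question01_b value → Spec_question01_b value (question01_b value)
def Claim_raises_question01_b : Prop := (∀ (value : Int), Dom_question01_b value → Raises_question01_b value → ¬ Pre_question01_b value) ∧ (Dom_question01_b (pvRaiseWitness_question01_b) ∧ Raises_question01_b (pvRaiseWitness_question01_b) ∧ question01_b_alt (pvRaiseWitness_question01_b) = pvRaiseWitnessOut_question01_b)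

-- ===== LEMMAS AND PROOFS =====

-- the mathematical recurrence both programs compute
def fRec (n : Nat) : Int :=
  if n < 5 then 0 else fRec (n / 2) + fRec (n / 2 + 1) + fRec (n / 2 + 2) + n
termination_by n
decreasing_by all_goals omega

lemma fRec_lt5 {n : Nat} (h : n < 5) : fRec n = 0 := by
  rw [fRec]; simp [h]

lemma pvTupGet_window {m : Nat}
    (ha : pvWindow (m : Int) = (fRec m, fRec (m+1), fRec (m+2), fRec (m+3), fRec (m+4)))
    (k : Nat) (hk : k ≤ 4) :
    pvTupGet (pvWindow (m : Int)) k = fRec (m + k) := by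
  rw [ha]
  interval_cases k <;> simp [pvTupGet]

lemma pvWindow_spec (n : Nat) :
    pvWindow (n : Int) = (fRec n, fRec (n+1), fRec (n+2), fRec (n+3), fRec (n+4)) := by
  induction n using Nat.strong_induction_on with
  | _ n ih =>
    rw [pvWindow]
    by_cases h0 : (n : Int) ≤ 0
    · have hn : n = 0 := by omega
      subst hn
      rw [if_pos h0, fRec_lt5 (by omega), fRec_lt5 (by omega), fRec_lt5 (by omega),
          fRec_lt5 (by omega), fRec_lt5 (by omega)]
    · rw [if_neg h0]
      have hn1 : 1 ≤ n := by omega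
      have hfd : PySem.Int.floordiv (n : Int) 2 = ((n / 2 : Nat) : Int) := by
        exact_mod_cast PySem.Int.floordiv_natCast n 2
      have ha := ih (n / 2) (by omega)
      have key : ∀ (j : Int) (jn : Nat), j = (jn : Int) → n ≤ jn → jn ≤ n + 4 →
          (if j < 5 then (0:Int)
           else
             pvTupGet (pvWindow (PySem.Int.floordiv (n : Int) 2))
               (PySem.Int.floordiv j 2 - PySem.Int.floordiv (n : Int) 2).toNat
             + pvTupGet (pvWindow (PySem.Int.floordiv (n : Int) 2))
               ((PySem.Int.floordiv j 2 - PySem.Int.floordiv (n : Int) 2).toNat + 1)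
             + pvTupGet (pvWindow (PySem.Int.floordiv (n : Int) 2))
               ((PySem.Int.floordiv j 2 - PySem.Int.floordiv (n : Int) 2).toNat + 2)
             + j) = fRec jn := by
        intro j jn hj hlo hhi
        subst hj
        by_cases h5 : jn < 5
        · rw [if_pos (by exact_mod_cast h5), fRec_lt5 h5]
        · rw [if_neg (by exact_mod_cast h5)]
          have hfd2 : PySem.Int.floordiv (jn : Int) 2 = ((jn / 2 : Nat) : Int) := by
            exact_mod_cast PySem.Int.floordiv_natCast jn 2
          rw [hfd, hfd2]
          have hoff : (((jn / 2 : Nat) : Int) - ((n / 2 : Nat) : Int)).toNat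
              = jn / 2 - n / 2 := by omega
          rw [hoff]
          have t1 : pvTupGet (pvWindow ((n / 2 : Nat) : Int)) (jn / 2 - n / 2)
              = fRec (jn / 2) := by
            rw [pvTupGet_window ha _ (by omega)]; congr 1; omega
          have t2 : pvTupGet (pvWindow ((n / 2 : Nat) : Int)) (jn / 2 - n / 2 + 1)
              = fRec (jn / 2 + 1) := by
            rw [pvTupGet_window ha _ (by omega)]; congr 1; omega
          have t3 : pvTupGet (pvWindow ((n / 2 : Nat) : Int)) (jn / 2 - n / 2 + 2)
              = fRec (jn / 2 + 2) := by
            rw [pvTupGet_window ha _ (by omega)]; congr 1; omega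
          rw [t1, t2, t3]
          have hrhs : fRec jn
              = fRec (jn / 2) + fRec (jn / 2 + 1) + fRec (jn / 2 + 2) + (jn : Int) := by
            rw [fRec, if_neg (by omega)]
          rw [hrhs]
      simp only [Prod.mk.injEq]
      refine ⟨?_, ?_, ?_, ?_, ?_⟩
      · exact key (n : Int) n rfl (by omega) (by omega)
      · exact key ((n : Int) + 1) (n + 1) (by push_cast; ring) (by omega) (by omega)
      · exact key ((n : Int) + 2) (n + 2) (by push_cast; ring) (by omega) (by omega)
      · exact key ((n : Int) + 3) (n + 3) (by push_cast; ring) (by omega) (by omega)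
      · exact key ((n : Int) + 4) (n + 4) (by push_cast; ring) (by omega) (by omega)

-- the DP table A maintains, after all i < m have been filled in
def vecAt (n m : Nat) : List Int :=
  (List.range (n + 1)).map (fun k => if k < m then fRec k else 0)

lemma getD_vecAt (n m k : Nat) (hk : k ≤ n) :
    (vecAt n m).getD k 0 = if k < m then fRec k else 0 := by
  unfold vecAt
  rw [List.getD_eq_getElem?_getD]
  simp [List.getElem?_map, List.getElem?_range (by omega : k < n + 1)]

lemma set_vecAt (n m : Nat) :
    (vecAt n m).set m (fRec m) = vecAt n (m + 1) := by
  unfold vecAt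
  apply List.ext_getElem
  · simp
  · intro k hk1 hk2
    simp only [List.length_map, List.length_range] at hk2
    rw [List.getElem_set]
    simp only [List.getElem_map, List.getElem_range]
    by_cases h : m = k
    · subst h; rw [if_pos rfl, if_pos (by omega)]
    · rw [if_neg h]
      by_cases h2 : k < m
      · rw [if_pos h2, if_pos (by omega)]
      · rw [if_neg h2, if_neg (by omega)]

lemma step_vecAt (n m : Nat) (h5 : 5 ≤ m) (hm : m ≤ n) :
    PySem.List.pySetD (vecAt n m) (m : Int)
      (PySem.List.pyGetD (vecAt n m) (PySem.Int.floordiv (m : Int) 2) 0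
        + PySem.List.pyGetD (vecAt n m) (PySem.Int.floordiv (m : Int) 2 + 1) 0
        + PySem.List.pyGetD (vecAt n m) (PySem.Int.floordiv (m : Int) 2 + 2) 0
        + (m : Int)) = vecAt n (m + 1) := by
  have hfd : PySem.Int.floordiv (m : Int) 2 = ((m / 2 : Nat) : Int) := by
    exact_mod_cast PySem.Int.floordiv_natCast m 2
  have c1 : PySem.Int.floordiv (m : Int) 2 + 1 = ((m / 2 + 1 : Nat) : Int) := by
    rw [hfd]; push_cast; ring
  have c2 : PySem.Int.floordiv (m : Int) 2 + 2 = ((m / 2 + 2 : Nat) : Int) := by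
    rw [hfd]; push_cast; ring
  rw [c1, c2, hfd]
  simp only [PySem.List.pyGetD_natCast, PySem.List.pySetD_natCast]
  rw [getD_vecAt n m (m / 2) (by omega), getD_vecAt n m (m / 2 + 1) (by omega),
      getD_vecAt n m (m / 2 + 2) (by omega)]
  rw [if_pos (by omega), if_pos (by omega), if_pos (by omega)]
  have hv : fRec m = fRec (m / 2) + fRec (m / 2 + 1) + fRec (m / 2 + 2) + (m : Int) := by
    rw [fRec, if_neg (by omega)]
  rw [← hv]
  exact set_vecAt n m

lemma loop_vecAt (n : Nat) : ∀ (m : Nat), 5 ≤ m → m ≤ n + 1 →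
    (PySem.List.pyRange (m : Int) ((n : Int) + 1) 1).foldl
      (fun v i =>
        PySem.List.pySetD v i
          (PySem.List.pyGetD v (PySem.Int.floordiv i 2) 0
            + PySem.List.pyGetD v (PySem.Int.floordiv i 2 + 1) 0
            + PySem.List.pyGetD v (PySem.Int.floordiv i 2 + 2) 0
            + i)) (vecAt n m) = vecAt n (n + 1) := by
  intro m h5 hm
  obtain ⟨d, hd⟩ : ∃ d, n + 1 - m = d := ⟨_, rfl⟩
  induction d generalizing m with
  | zero =>
    have he : m = n + 1 := by omega
    subst he
    rw [PySem.List.pyRange_one_eq_nil (by push_cast; omega)]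
    rfl
  | succ d ih =>
    have hlt : m ≤ n := by omega
    rw [PySem.List.pyRange_one_cons (by omega)]
    rw [List.foldl_cons]
    rw [step_vecAt n m h5 hlt]
    have hc : (m : Int) + 1 = ((m + 1 : Nat) : Int) := by push_cast; ring
    rw [hc]
    exact ih (m + 1) (by omega) (by omega) (by omega)

lemma init_vecAt (n : Nat) :
    (PySem.List.pyRange 0 ((n : Int) + 1) 1).map (fun _ => (0 : Int)) = vecAt n 5 := by
  apply List.ext_getElem
  · simp [PySem.List.length_pyRange_one, vecAt]
  · intro k hk1 hk2
    simp only [List.getElem_map]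
    unfold vecAt
    simp only [List.getElem_map, List.getElem_range]
    split_ifs with h
    · rw [fRec_lt5 h]
    · rfl

-- ===== VERDICT (by name: the statement is the Claim_ definition above) =====
theorem question01_b_spec : Claim_equal_question01_b := by
  intro value _ hpre
  have h0 : 0 ≤ value := hpre
  unfold Spec_question01_b question01_b question01_b_alt
  obtain ⟨n, rfl⟩ : ∃ n : Nat, value = (n : Int) := ⟨value.toNat, by omega⟩
  rw [pvWindow_spec n]
  simp only []
  rw [init_vecAt n]
  by_cases hn : 4 ≤ n
  · rw [show ((5:Int)) = ((5 : Nat) : Int) by norm_num]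
    rw [loop_vecAt n 5 (by omega) (by omega)]
    rw [PySem.List.pyGetD_natCast]
    rw [getD_vecAt n (n + 1) n (by omega), if_pos (by omega)]
  · rw [PySem.List.pyRange_one_eq_nil (by omega), List.foldl_nil]
    rw [PySem.List.pyGetD_natCast]
    rw [getD_vecAt n 5 n (by omega), if_pos (by omega)]

@[simp] theorem question01_b_raises : Claim_raises_question01_b := by
  unfold Claim_raises_question01_b
  refine ⟨fun v _ hr hp => by unfold Raises_question01_b at hr; unfold Pre_question01_b at hp; omega, ?_, ?_, ?_⟩
  · decide
  · unfold Raises_question01_b pvRaiseWitness_question01_b; omega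
  · unfold question01_b_alt pvRaiseWitness_question01_b pvRaiseWitnessOut_question01_b
    rw [pvWindow]
    norm_num
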